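-- pv_equiv track=rewrite | github.com/robinhood/faust | extra/tools/render_configuration_reference.py | strip_space
-- ===== SOURCE A (Python) =====
-- def strip_space(n: int, line: str) -> str:
--     sentinel = False
--     result = []
--     for i, c in enumerate(line):
--         if not c.isspace() or i > n:
--             sentinel = True
--         if sentinel:
--             result.append(c)
--     return ''.join(result)
-- ===== SOURCE B (Python) =====
-- def strip_space(n: int, line: str) -> str:
--     b = max(0, n + 1)
--     return line[:b].lstrip() + line[b:]
-- ===== Notes on version B (the rewrite author's own statement) =====
-- stated objective: simpler
-- what changed: Replaces A's character-by-character scan with a latching sentinel flag and appended result list by a boundary computation b = max(0, n+1) followed by a prefix lstrip plus slice concatenation.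
import Mathlib
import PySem

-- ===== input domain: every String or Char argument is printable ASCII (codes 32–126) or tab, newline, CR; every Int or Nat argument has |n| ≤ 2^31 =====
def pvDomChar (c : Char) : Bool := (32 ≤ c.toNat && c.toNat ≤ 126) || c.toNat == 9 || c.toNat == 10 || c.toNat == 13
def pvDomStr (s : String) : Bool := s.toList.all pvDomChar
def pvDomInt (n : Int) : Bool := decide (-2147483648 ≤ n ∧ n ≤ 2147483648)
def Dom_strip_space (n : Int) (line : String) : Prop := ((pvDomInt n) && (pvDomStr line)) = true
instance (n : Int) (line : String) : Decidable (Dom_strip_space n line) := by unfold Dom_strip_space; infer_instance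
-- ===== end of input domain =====

-- B replaces A's latching-sentinel character scan by a boundary computation plus prefix-lstrip and slice concatenation (objective: simpler).

-- ===== PORT A =====
-- the for-loop over enumerate(line) with its sentinel flag and result accumulator
def stripSpaceGo (n : Int) (i : Nat) (sentinel : Bool) (result : List Char) : List Char → List Char
  | [] => result
  | c :: rest =>
      let s := if !(PySem.Chars.isspace c) || (i : Int) > n then true else sentinel
      stripSpaceGo n (i + 1) s (if s then result ++ [c] else result) rest

def strip_space (n : Int) (line : String) : String :=
  String.ofList (stripSpaceGo n 0 false [] line.toList)

-- ===== PORT B =====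
def strip_space_alt (n : Int) (line : String) : String :=
  let b : Int := max 0 (n + 1)
  PySem.Str.lstrip (PySem.Str.slice line none (some b)) ++ PySem.Str.slice line (some b) none

-- ===== PRECONDITION & SPEC =====
def Spec_strip_space (n : Int) (line : String) (out : String) : Prop := out = strip_space_alt n line
instance (n : Int) (line : String) (out : String) : Decidable (Spec_strip_space n line out) := by unfold Spec_strip_space; infer_instance

-- ===== CLAIM (what is proved, stated in full; the proofs are below) =====
def Claim_equal_strip_space : Prop := ∀ (n : Int) (line : String), Dom_strip_space n line → Spec_strip_space n line (strip_space n line)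

-- ===== LEMMAS AND PROOFS =====

theorem go_true (n : Int) : ∀ (l : List Char) (i : Nat) (acc : List Char),
    stripSpaceGo n i true acc l = acc ++ l := by
  intro l
  induction l with
  | nil => intro i acc; simp [stripSpaceGo]
  | cons c rest ih =>
      intro i acc
      simp [stripSpaceGo, ih]

theorem go_false (n : Int) : ∀ (l : List Char) (i : Nat) (acc : List Char),
    stripSpaceGo n i false acc l =
      acc ++ (List.dropWhile PySem.Chars.isspace (l.take (n + 1 - i).toNat)
              ++ l.drop (n + 1 - i).toNat) := by
  intro l
  induction l with
  | nil => intro i acc; simp [stripSpaceGo]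
  | cons c rest ih =>
      intro i acc
      by_cases hsp : PySem.Chars.isspace c = true <;> by_cases hgt : (i : Int) > n
      · have hm : (n + 1 - (i : Int)).toNat = 0 := by omega
        simp [stripSpaceGo, hsp, hgt, go_true, hm]
      · have hm : (n + 1 - (i : Int)).toNat = (n + 1 - ((i : Nat) + 1 : Nat)).toNat + 1 := by
          push_cast; omega
        simp [stripSpaceGo, hsp, hgt, ih, hm]
      · have hm : (n + 1 - (i : Int)).toNat = 0 := by omega
        simp [stripSpaceGo, hsp, hgt, go_true, hm]
      · have hm : (n + 1 - (i : Int)).toNat = (n + 1 - ((i : Nat) + 1 : Nat)).toNat + 1 := by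
          push_cast; omega
        simp [stripSpaceGo, hsp, hgt, go_true, hm, List.take_append_drop]

theorem strip_space_spec' (n : Int) (line : String) :
    strip_space n line = strip_space_alt n line := by
  unfold strip_space strip_space_alt
  have hb : (max 0 (n + 1)).toNat = (n + 1).toNat := by omega
  have hge : (0 : Int) ≤ max 0 (n + 1) := le_max_left _ _
  apply String.ext
  rw [go_false]
  simp [PySem.Str.lstrip, PySem.Str.slice, PySem.Chars.lstrip,
        PySem.List.slice_to _ hge, PySem.List.slice_from _ hge, hb]

-- ===== VERDICT (by name: the statement is the Claim_ definition above) =====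
theorem strip_space_spec : Claim_equal_strip_space := by
  intro n line _
  exact strip_space_spec' n line
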